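-- pv_equiv track=rewrite | github.com/NIB-SI/PhasiHunter | bin/integrationFunction.py | SplitCluster
-- ===== SOURCE A (Python) =====
-- def SplitCluster(final_cluster: list, island_number=5, phase_length=21):
--     """split list into subcluster
--
--     Parameters
--     ----------
--     final_cluster : list
--         sorted unique list
--     island_number : int, optional
--         island number, by default 5
--     phase_length : int, optional
--         phase length, by default 21
--
--     Returns
--     -------
--     dict
--         {
--             cluster1:[...],
--             cluster2:[...],
--             ...
--         }
--     """
--     if phase_length == 21:
--         condition_list = [0, 2, 19]
--     elif phase_length ==24:
--         condition_list = [0, 2, 22]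
--     cluster = 1
--     list_ = final_cluster[::-1]
--     duplication = {}
--     elem = list_.pop()
--     index = 0 + 1
--     if cluster not in duplication:
--         duplication[cluster] = [elem]
--     for i in final_cluster[index:]:
--         if (i - elem)%phase_length in condition_list and (i-elem) <= island_number * phase_length + 2:
--             elem = list_.pop()
--             duplication[cluster].append(elem)
--         else:
--             cluster += 1
--             elem = list_.pop()
--             if cluster not in duplication:
--                 duplication[cluster] = [elem]
--     return duplication
-- ===== SOURCE B (Python) =====
-- def SplitCluster(final_cluster: list, island_number=5, phase_length=21):
--     """Two-phase: find cluster-start indices, then slice the list at them."""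
--     n = len(final_cluster)
--     cond = {21: [0, 2, 19], 24: [0, 2, 22]}
--     starts = [0] + [k for k in range(1, n)
--                     if not ((final_cluster[k] - final_cluster[k - 1]) % phase_length
--                                 in cond[phase_length]
--                             and final_cluster[k] - final_cluster[k - 1]
--                                 <= island_number * phase_length + 2)]
--     ends = starts[1:] + [n]
--     return {c: final_cluster[s:e] for c, (s, e) in enumerate(zip(starts, ends), 1)}
-- ===== Notes on version B (the rewrite author's own statement) =====
-- stated objective: alternative
-- what changed: Replaces A's single stateful loop (cluster counter, in-place dict mutation, a carried previous element and a parallel reversed pop-stack) by a staged index-based decomposition: one pass over index pairs (k-1,k) collects the break indices where a new cluster starts, then the list is sliced at those boundaries and the slices are numbered with enumerate.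
import Mathlib
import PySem

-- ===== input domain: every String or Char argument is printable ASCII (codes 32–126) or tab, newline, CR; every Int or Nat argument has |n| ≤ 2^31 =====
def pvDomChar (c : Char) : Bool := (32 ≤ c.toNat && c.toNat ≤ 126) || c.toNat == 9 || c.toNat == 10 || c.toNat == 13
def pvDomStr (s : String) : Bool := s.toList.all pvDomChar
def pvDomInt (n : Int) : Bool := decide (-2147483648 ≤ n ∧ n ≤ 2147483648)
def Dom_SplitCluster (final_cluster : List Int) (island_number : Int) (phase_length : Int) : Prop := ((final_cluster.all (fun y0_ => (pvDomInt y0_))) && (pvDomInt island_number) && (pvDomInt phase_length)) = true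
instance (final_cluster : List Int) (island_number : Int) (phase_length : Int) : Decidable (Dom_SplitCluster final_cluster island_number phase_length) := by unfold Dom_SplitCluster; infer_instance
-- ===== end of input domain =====

-- B replaces A's single stateful loop (cluster counter, dict mutation, carried element, a
-- parallel reversed pop-stack) by a staged decomposition: collect the break indices over
-- consecutive index pairs, then slice the list at them; objective: alternative.

-- ===== PORT A =====
def pvCondList (p : Int) : List Int :=
  -- A's if/elif: for any other phase_length condition_list is UNBOUND (NameError once the
  -- loop body runs); those inputs are outside Pre_, the [] here is never reached under Pre_.
  if p = 21 then [0, 2, 19] else if p = 24 then [0, 2, 22] else []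

def pvCondA (cl : List Int) (island p elem i : Int) : Bool :=
  cl.contains (PySem.Int.mod (i - elem) p) && decide (i - elem ≤ island * p + 2)

-- the for-loop; state = (cluster, list_, duplication, elem); the none branches of pop are
-- Python's IndexError, unreachable under Pre_ (final_cluster nonempty)
def pvLoopA (cl : List Int) (island p : Int) :
    List Int → Int → List Int → PySem.Dict Int (List Int) → Int → PySem.Dict Int (List Int)
  | [], _, _, dup, _ => dup
  | i :: rest, cluster, lst, dup, elem =>
    if pvCondA cl island p elem i then
      match PySem.List.pop? lst with
      | some (e, lst') => pvLoopA cl island p rest cluster lst' (dup.modify cluster [] (fun l => l ++ [e])) e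
      | none => dup
    else
      match PySem.List.pop? lst with
      | some (e, lst') =>
          pvLoopA cl island p rest (cluster + 1) lst'
            (if dup.contains (cluster + 1) then dup else dup.insert (cluster + 1) [e]) e
      | none => dup

def SplitCluster (final_cluster : List Int) (island_number : Int) (phase_length : Int) : List (Int × List Int) :=
  let condition_list := pvCondList phase_length
  -- final_cluster[::-1]: step -1 ≠ 0, so slice? is always some
  let list_ := (PySem.List.slice? final_cluster none none (-1)).getD []
  match PySem.List.pop? list_ with
  | none => []   -- Python: IndexError (empty list); outside Pre_
  | some (elem, list1) =>
    let index : Int := 0 + 1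
    let dup : PySem.Dict Int (List Int) :=
      if (PySem.Dict.empty : PySem.Dict Int (List Int)).contains 1 then PySem.Dict.empty
      else (PySem.Dict.empty : PySem.Dict Int (List Int)).insert 1 [elem]
    (pvLoopA condition_list island_number phase_length
        (PySem.List.slice final_cluster (some index) none) 1 list1 dup elem).items

-- ===== PORT B =====
-- the literal dict {21: [0,2,19], 24: [0,2,22]}
def pvCondDict : PySem.Dict Int (List Int) :=
  PySem.Dict.mk [(21, [0, 2, 19]), (24, [0, 2, 22])]

def SplitCluster_alt (final_cluster : List Int) (island_number : Int) (phase_length : Int) : List (Int × List Int) :=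
  let n : Int := final_cluster.length
  -- the comprehension's condition, inline as in Source B; cond[phase_length] is evaluated inside
  -- the comprehension, once per pair: the getD [] stands for Python's KeyError on an
  -- unsupported phase_length, outside Pre_; the pyGetD 0 defaults are never hit (1 ≤ k < n)
  let starts : List Int := 0 :: (PySem.List.pyRange 1 n 1).filter (fun k =>
      ! ((pvCondDict.getD phase_length []).contains
            (PySem.Int.mod (PySem.List.pyGetD final_cluster k 0
              - PySem.List.pyGetD final_cluster (k - 1) 0) phase_length)
          && decide (PySem.List.pyGetD final_cluster k 0
              - PySem.List.pyGetD final_cluster (k - 1) 0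
                ≤ island_number * phase_length + 2)))
  let ends := starts.tail ++ [n]
  PySem.List.enumerate
    ((starts.zip ends).map (fun se => PySem.List.slice final_cluster (some se.1) (some se.2))) 1

-- ===== PRECONDITION & SPEC =====
-- Pre_ = exactly the inputs where A returns: a nonempty list (else list_.pop() raises
-- IndexError) and, as soon as the loop body runs (length ≥ 2), phase_length 21 or 24
-- (else condition_list is unbound: NameError; phase_length 0 would be ZeroDivisionError).
def Pre_SplitCluster (final_cluster : List Int) (island_number : Int) (phase_length : Int) : Prop :=
  final_cluster ≠ [] ∧ (2 ≤ final_cluster.length → (phase_length = 21 ∨ phase_length = 24))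
instance (final_cluster : List Int) (island_number : Int) (phase_length : Int) : Decidable (Pre_SplitCluster final_cluster island_number phase_length) := by unfold Pre_SplitCluster; infer_instance
def pvWitness_SplitCluster : List Int × Int × Int := ([3, 24, 100], 5, 21)

def Spec_SplitCluster (final_cluster : List Int) (island_number : Int) (phase_length : Int) (out : List (Int × List Int)) : Prop := out = SplitCluster_alt final_cluster island_number phase_length
instance (final_cluster : List Int) (island_number : Int) (phase_length : Int) (out : List (Int × List Int)) : Decidable (Spec_SplitCluster final_cluster island_number phase_length out) := by unfold Spec_SplitCluster; infer_instance

-- ===== CLAIM (what is proved, stated in full; the proofs are below) =====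
def Claim_equal_SplitCluster : Prop := ∀ (final_cluster : List Int) (island_number : Int) (phase_length : Int), Dom_SplitCluster final_cluster island_number phase_length → Pre_SplitCluster final_cluster island_number phase_length → Spec_SplitCluster final_cluster island_number phase_length (SplitCluster final_cluster island_number phase_length)

-- ===== LEMMAS AND PROOFS =====

-- A's condition with A's if/elif list equals B's condition with B's dict lookup, for every p
lemma pvCondList_eq_dict (p : Int) : pvCondList p = pvCondDict.getD p [] := by
  by_cases h21 : p = 21
  · subst h21; decide
  by_cases h24 : p = 24
  · subst h24; decide
  · simp [pvCondList, pvCondDict, PySem.Dict.getD, PySem.Dict.get?, List.find?, h21, h24,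
      show ((21 : Int) == p) = false from by simpa using Ne.symm h21,
      show ((24 : Int) == p) = false from by simpa using Ne.symm h24]

-- proof-side intermediate: the run-grouping step A's loop performs, with the condition abstract
def pvStep (c : Int → Int → Bool) (gs : List (List Int)) (x : Int) : List (List Int) :=
  match PySem.List.pyGet? gs (-1) with
  | some g =>
    match PySem.List.pyGet? g (-1) with
    | some prev =>
        if c prev x then gs.dropLast ++ [g ++ [x]] else gs ++ [[x]]
    | none => gs ++ [[x]]
  | none => gs ++ [[x]]

-- front recursion over the remaining elements, carrying the open group and its last element
def pvGroupF (c : Int → Int → Bool) : List Int → Int → List Int → List (List Int)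
  | g, _, [] => [g]
  | g, prev, x :: l =>
    if c prev x then pvGroupF c (g ++ [x]) x l else g :: pvGroupF c [x] x l

-- keys of an enumerate-from-m dict are < m + length: a larger key is absent
lemma pvContains_enum (gs : List (List Int)) (m k : Int) (hk : m + gs.length ≤ k) :
    (PySem.Dict.mk (PySem.List.enumerate gs m)).contains k = false := by
  induction gs generalizing m with
  | nil => simp [PySem.Dict.contains, PySem.List.enumerate_nil]
  | cons g t ih =>
    simp only [List.length_cons] at hk
    push_cast at hk
    have h1 : (m == k) = false := by simp only [beq_eq_false_iff_ne]; omega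
    have h2 := ih (m + 1) (by push_cast; omega)
    simp only [PySem.Dict.contains] at h2 ⊢
    simp [PySem.List.enumerate_cons, h1, h2]

-- inserting the next key appends the next run
lemma pvInsert_enum (gs : List (List Int)) (v : List Int) (m : Int) :
    (PySem.Dict.mk (PySem.List.enumerate gs m)).insert (m + gs.length) v
      = PySem.Dict.mk (PySem.List.enumerate (gs ++ [v]) m) := by
  have hc := pvContains_enum gs m (m + gs.length) le_rfl
  simp only [PySem.Dict.insert, hc, Bool.false_eq_true, if_false,
    PySem.List.enumerate_append, PySem.List.enumerate_cons, PySem.List.enumerate_nil]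

lemma pvFind_enum (gs : List (List Int)) (g : List Int) (m : Int) :
    List.find? (fun p => p.1 == m + (gs.length : Int)) (PySem.List.enumerate (gs ++ [g]) m)
      = some (m + (gs.length : Int), g) := by
  induction gs generalizing m with
  | nil => simp [PySem.List.enumerate_cons, PySem.List.enumerate_nil]
  | cons h t ih =>
    have h1 : (m == m + (((h :: t).length : Nat) : Int)) = false := by
      simp only [beq_eq_false_iff_ne, List.length_cons]; push_cast; omega
    have h2 := ih (m + 1)
    rw [show m + (((h :: t).length : Nat) : Int) = (m + 1) + ((t.length : Nat) : Int) by
      simp only [List.length_cons]; push_cast; ring] at h1 ⊢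
    simp only [List.cons_append, PySem.List.enumerate_cons, List.find?_cons, h1]
    exact h2

lemma pvMap_enum (gs : List (List Int)) (g : List Int) (m : Int) (v : List Int) :
    (PySem.List.enumerate (gs ++ [g]) m).map
        (fun p => if p.1 = m + (gs.length : Int) then (m + (gs.length : Int), v) else p)
      = PySem.List.enumerate (gs ++ [v]) m := by
  induction gs generalizing m with
  | nil => simp [PySem.List.enumerate_cons, PySem.List.enumerate_nil]
  | cons h t ih =>
    have h1 : ¬ (m = m + (((h :: t).length : Nat) : Int)) := by simp only [List.length_cons]; push_cast; omega
    have h2 := ih (m + 1)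
    rw [show m + (((h :: t).length : Nat) : Int) = (m + 1) + ((t.length : Nat) : Int) by
      simp only [List.length_cons]; push_cast; ring] at h1 ⊢
    simp only [List.cons_append, PySem.List.enumerate_cons, List.map_cons, if_neg h1]
    rw [h2]

-- modifying at the last key rewrites the last run
lemma pvModify_enum (gs : List (List Int)) (g : List Int) (m : Int) (f : List Int → List Int) :
    (PySem.Dict.mk (PySem.List.enumerate (gs ++ [g]) m)).modify (m + gs.length) [] f
      = PySem.Dict.mk (PySem.List.enumerate (gs ++ [f g]) m) := by
  have hf := pvFind_enum gs g m
  have hmap := pvMap_enum gs g m (f g)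
  have ha : ((PySem.List.enumerate (gs ++ [g]) m).any
      fun p => p.1 == m + (gs.length : Int)) = true := by
    rw [List.any_eq_true]
    exact ⟨_, List.mem_of_find?_eq_some hf, by simp⟩
  simp only [PySem.Dict.modify, PySem.Dict.insert, PySem.Dict.contains, PySem.Dict.getD,
    PySem.Dict.get?, hf, ha, Option.map_some, Option.getD_some, if_true]
  simp only [beq_iff_eq]
  exact congrArg PySem.Dict.mk hmap

set_option maxHeartbeats 1000000 in
-- main loop invariant: A's state after a prefix is the enumerate-dict of the runs so far
lemma pvLoop_eq (cl : List Int) (island p : Int) :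
    ∀ (rest : List Int) (gs : List (List Int)) (g : List Int) (prev : Int),
    pvLoopA cl island p rest ((gs.length : Int) + 1) rest.reverse
        (PySem.Dict.mk (PySem.List.enumerate (gs ++ [g ++ [prev]]) 1)) prev
      = PySem.Dict.mk (PySem.List.enumerate
          (List.foldl (pvStep (pvCondA cl island p)) (gs ++ [g ++ [prev]]) rest) 1) := by
  intro rest
  induction rest with
  | nil => intro gs g prev; rfl
  | cons i rest ih =>
    intro gs g prev
    have hpop : PySem.List.pop? (i :: rest).reverse = some (i, rest.reverse) := by
      rw [List.reverse_cons]; exact PySem.List.pop?_last _ _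
    have hstep : pvStep (pvCondA cl island p) (gs ++ [g ++ [prev]]) i =
        if pvCondA cl island p prev i then gs ++ [(g ++ [prev]) ++ [i]]
        else (gs ++ [g ++ [prev]]) ++ [[i]] := by
      simp [pvStep, PySem.List.pyGet?_neg_one]
    rw [pvLoopA, hpop]
    by_cases hcb : pvCondA cl island p prev i
    · rw [if_pos hcb]
      dsimp only
      have hm := pvModify_enum gs (g ++ [prev]) 1 (fun l => l ++ [i])
      rw [show (gs.length : Int) + 1 = 1 + gs.length by ring, hm,
          show (1 : Int) + gs.length = (gs.length : Int) + 1 by ring]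
      have := ih gs (g ++ [prev]) i
      rw [List.foldl_cons, hstep, if_pos hcb]
      rw [List.append_assoc] at this ⊢
      simpa using this
    · rw [if_neg hcb]
      dsimp only
      have hcon : (PySem.Dict.mk (PySem.List.enumerate (gs ++ [g ++ [prev]]) 1)).contains
          ((gs.length : Int) + 1 + 1) = false := by
        apply pvContains_enum; simp; omega
      rw [hcon]
      simp only [Bool.false_eq_true, if_false]
      have hins := pvInsert_enum (gs ++ [g ++ [prev]]) [i] 1
      have hkey : ((gs.length : Int) + 1 + 1) = (1 : Int) + ((gs ++ [g ++ [prev]]).length : Int) := by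
        simp; ring
      rw [hkey, hins]
      have := ih (gs ++ [g ++ [prev]]) [] i
      rw [List.foldl_cons, hstep, if_neg hcb]
      rw [show (1:Int) + ((gs ++ [g ++ [prev]]).length : Int)
            = ((gs ++ [g ++ [prev]]).length : Int) + 1 by ring]
      simpa using this

-- the fold over pvStep with a nonempty open last group is the front recursion pvGroupF
lemma pvFold_eq_groupF (c : Int → Int → Bool) :
    ∀ (l : List Int) (gs : List (List Int)) (g : List Int) (prev : Int),
    List.foldl (pvStep c) (gs ++ [g ++ [prev]]) l = gs ++ pvGroupF c (g ++ [prev]) prev l := by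
  intro l
  induction l with
  | nil => intro gs g prev; simp [pvGroupF]
  | cons x l ih =>
    intro gs g prev
    have hstep : pvStep c (gs ++ [g ++ [prev]]) x =
        if c prev x then gs ++ [(g ++ [prev]) ++ [x]]
        else (gs ++ [g ++ [prev]]) ++ [[x]] := by
      simp [pvStep, PySem.List.pyGet?_neg_one]
    rw [List.foldl_cons, hstep, pvGroupF]
    by_cases hc : c prev x
    · rw [if_pos hc, if_pos hc]
      have := ih gs (g ++ [prev]) x
      rw [List.append_assoc] at this ⊢
      simpa using this
    · rw [if_neg hc, if_neg hc]
      have := ih (gs ++ [g ++ [prev]]) [] x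
      simpa using this

lemma pvFold_nil_eq_groupF (c : Int → Int → Bool) (x : Int) (l : List Int) :
    List.foldl (pvStep c) [] (x :: l) = pvGroupF c [x] x l := by
  have h0 : pvStep c [] x = [[x]] := by simp [pvStep, PySem.List.pyGet?]
  have := pvFold_eq_groupF c l [] [] x
  simpa [h0] using this

-- the front recursion from index j with open group fc[s:j] equals B's break-index slicing
lemma pvGroupF_eq_slices (fc : List Int) (c : Int → Int → Bool) :
    ∀ (d s j : Nat), fc.length - j ≤ d → 0 < j → s < j → j ≤ fc.length →
    pvGroupF c ((fc.drop s).take (j - s)) (fc.getD (j - 1) 0) (fc.drop j)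
      = ((((s : Int) :: (PySem.List.pyRange (j : Int) (fc.length : Int) 1).filter
            (fun k => ! c (PySem.List.pyGetD fc (k - 1) 0) (PySem.List.pyGetD fc k 0))).zip
          (((PySem.List.pyRange (j : Int) (fc.length : Int) 1).filter
            (fun k => ! c (PySem.List.pyGetD fc (k - 1) 0) (PySem.List.pyGetD fc k 0)))
            ++ [(fc.length : Int)])).map
          (fun se => PySem.List.slice fc (some se.1) (some se.2))) := by
  intro d
  induction d with
  | zero =>
    intro s j hd h0 hsj hjn
    have hj : j = fc.length := by omega
    subst hj
    rw [List.drop_length, PySem.List.pyRange_one_eq_nil le_rfl]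
    simp [pvGroupF, PySem.List.slice_natCast]
  | succ d ih =>
    intro s j hd h0 hsj hjn
    rcases Nat.eq_or_lt_of_le hjn with hj | hj
    · subst hj
      rw [List.drop_length, PySem.List.pyRange_one_eq_nil le_rfl]
      simp [pvGroupF, PySem.List.slice_natCast]
    · -- j < fc.length
      have hdrop : fc.drop j = fc[j] :: fc.drop (j + 1) := List.drop_eq_getElem_cons hj
      have hrange : PySem.List.pyRange (j : Int) (fc.length : Int) 1
          = (j : Int) :: PySem.List.pyRange ((j : Int) + 1) (fc.length : Int) 1 :=
        PySem.List.pyRange_one_cons (by exact_mod_cast hj)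
      have hprev : PySem.List.pyGetD fc ((j : Int) - 1) 0 = fc.getD (j - 1) 0 := by
        rw [show (j : Int) - 1 = ((j - 1 : Nat) : Int) by omega]
        exact PySem.List.pyGetD_natCast fc (j - 1) 0
      have hcur : PySem.List.pyGetD fc (j : Int) 0 = fc[j] := by
        rw [PySem.List.pyGetD_natCast]
        simp [List.getD_eq_getElem?_getD, hj]
      have hgd : fc.getD (j + 1 - 1) 0 = fc[j] := by
        simp [List.getD_eq_getElem?_getD, hj]
      have htake : (fc.drop s).take (j - s) ++ [fc[j]] = (fc.drop s).take (j + 1 - s) := by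
        rw [show j + 1 - s = (j - s) + 1 by omega, List.take_add_one]
        have : (fc.drop s)[j - s]? = some fc[j] := by
          rw [List.getElem?_drop]
          rw [show s + (j - s) = j by omega]
          exact List.getElem?_eq_getElem hj
        simp [this]
      have hsingle : [fc[j]] = (fc.drop j).take (j + 1 - j) := by
        rw [show j + 1 - j = 1 by omega, hdrop, List.take_succ_cons, List.take_zero]
      rw [hdrop, pvGroupF, hrange]
      by_cases hc : c (fc.getD (j - 1) 0) fc[j]
      · rw [if_pos hc]
        have hfilt : (! c (PySem.List.pyGetD fc ((j : Int) - 1) 0)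
            (PySem.List.pyGetD fc (j : Int) 0)) = false := by
          rw [hprev, hcur, hc]; rfl
        rw [List.filter_cons_of_neg (by simpa using hfilt)]
        rw [htake, show ((j : Int) + 1) = ((j + 1 : Nat) : Int) by push_cast; ring]
        have := ih s (j + 1) (by omega) (by omega) (by omega) hj
        rw [hgd] at this
        exact this
      · rw [if_neg hc]
        have hfilt : (! c (PySem.List.pyGetD fc ((j : Int) - 1) 0)
            (PySem.List.pyGetD fc (j : Int) 0)) = true := by
          have hc' : c (fc.getD (j - 1) 0) fc[j] = false := by simpa using hc
          rw [hprev, hcur, hc']; rfl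
        rw [List.filter_cons_of_pos (by simpa using hfilt)]
        rw [show ((j : Int) + 1) = ((j + 1 : Nat) : Int) by push_cast; ring]
        rw [List.cons_append, List.zip_cons_cons, List.map_cons,
            show PySem.List.slice fc (some (s : Int)) (some (j : Int)) = (fc.drop s).take (j - s)
              from PySem.List.slice_natCast fc s j]
        have := ih j (j + 1) (by omega) (by omega) (by omega) hj
        rw [← hsingle, hgd] at this
        rw [this]

-- ===== VERDICT (by name: the statement is the Claim_ definition above) =====
theorem SplitCluster_spec : Claim_equal_SplitCluster := by
  unfold Claim_equal_SplitCluster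
  intro fc island p _ hpre
  unfold Spec_SplitCluster
  obtain ⟨hne, -⟩ := hpre
  match fc with
  | [] => exact absurd rfl hne
  | x :: xs =>
    -- A's result is the enumerate-dict of the run-grouping fold
    have hA : SplitCluster (x :: xs) island p
        = PySem.List.enumerate
            (List.foldl (pvStep (pvCondA (pvCondList p) island p)) [] (x :: xs)) 1 := by
      have hrev : (x :: xs).reverse = xs.reverse ++ [x] := by simp
      have hd0 : (PySem.Dict.mk ([] : List (Int × List Int))).insert 1 [x]
          = PySem.Dict.mk (PySem.List.enumerate [[x]] 1) := by
        simp [PySem.Dict.insert, PySem.Dict.contains,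
              PySem.List.enumerate_cons, PySem.List.enumerate_nil]
      have hmain := pvLoop_eq (pvCondList p) island p xs [] [] x
      simp only [List.nil_append, List.length_nil, Nat.cast_zero, zero_add] at hmain
      have h0 : pvStep (pvCondA (pvCondList p) island p) [] x = [[x]] := by
        simp [pvStep, PySem.List.pyGet?]
      simp only [SplitCluster, PySem.List.slice?_none_none_neg_one,
                 Option.getD_some, hrev, PySem.List.pop?_last, zero_add,
                 PySem.List.slice_from_one, List.tail_cons, PySem.Dict.contains,
                 PySem.Dict.empty, List.any_nil, Bool.false_eq_true, if_false]
      rw [hd0, hmain, List.foldl_cons, h0]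
    -- the fold is B's break-index slicing
    have hfold := pvFold_nil_eq_groupF (pvCondA (pvCondList p) island p) x xs
    have hslice := pvGroupF_eq_slices (x :: xs) (pvCondA (pvCondList p) island p)
        ((x :: xs).length) 0 1 (by omega) (by omega) (by omega) (by simp)
    simp only [List.drop_zero, List.drop_one, List.tail_cons, Nat.cast_one, Nat.cast_zero] at hslice
    rw [hA, hfold]
    rw [show (x :: xs).take (1 - 0) = [x] by simp,
        show (x :: xs).getD (1 - 1) 0 = x by simp] at hslice
    rw [hslice, pvCondList_eq_dict]
    rfl
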